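-- pv_equiv track=rewrite | github.com/devmode2025/ConsultingAI-digital-advisory | src/coordination/enhanced_coordination.py | _find_common_ground
-- ===== SOURCE A (Python) =====
-- from typing import Dict, Any, List, Optional, Tuple
--
-- def _find_common_ground(agent_responses: List[Dict[str, Any]]) -> List[str]:
--     """Identify common elements across agent responses"""
--     all_focus_areas = []
--     for response in agent_responses:
--         focus_areas = response.get("focus_areas", [])
--         all_focus_areas.extend(focus_areas)
--
--     # Find focus areas mentioned by multiple agents
--     from collections import Counter
--     focus_counts = Counter(all_focus_areas)
--     common_ground = [area for area, count in focus_counts.items() if count > 1]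
--
--     return common_ground
-- ===== SOURCE B (Python) =====
-- def _find_common_ground(agent_responses):
--     """Identify common elements across agent responses.
--
--     No counting structure at all: position i of the flattened list is emitted
--     iff its area does not occur earlier (first occurrence) and occurs again
--     later (mentioned more than once) -- decided by scanning the list itself.
--     """
--     flat = [area for response in agent_responses
--                  for area in response.get("focus_areas", [])]
--     return [x for i, x in enumerate(flat)
--             if x not in flat[:i] and x in flat[i + 1:]]
-- ===== Notes on version B (the rewrite author's own statement) =====
-- stated objective: alternative
-- what changed: Drops Counter entirely: the flattened list is its own evidence -- position i is emitted iff its area is absent from flat[:i] and present in flat[i+1:], so no counting or auxiliary map/set is ever built (a quadratic self-scan instead of a linear hash-count).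
import Mathlib
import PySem

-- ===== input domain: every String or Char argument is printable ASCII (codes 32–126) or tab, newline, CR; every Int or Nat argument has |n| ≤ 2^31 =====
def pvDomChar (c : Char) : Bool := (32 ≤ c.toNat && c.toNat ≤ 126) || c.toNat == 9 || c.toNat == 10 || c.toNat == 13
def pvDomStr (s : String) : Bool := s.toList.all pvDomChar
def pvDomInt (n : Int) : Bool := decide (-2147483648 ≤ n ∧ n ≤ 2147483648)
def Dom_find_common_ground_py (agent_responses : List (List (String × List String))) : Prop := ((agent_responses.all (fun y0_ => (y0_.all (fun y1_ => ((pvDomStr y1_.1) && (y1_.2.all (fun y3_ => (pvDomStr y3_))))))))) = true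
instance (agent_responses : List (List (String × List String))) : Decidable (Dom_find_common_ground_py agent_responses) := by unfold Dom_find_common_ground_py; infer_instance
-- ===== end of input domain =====

-- B drops Counter entirely: the flattened list is scanned against itself — position i is
-- emitted iff its area is absent from flat[:i] and present in flat[i+1:]; objective: alternative.

-- ===== PORT A =====
def find_common_ground_py (agent_responses : List (List (String × List String))) : List String :=
  let all_focus_areas :=
    agent_responses.foldl
      (fun acc response => acc ++ (PySem.Dict.mk response).getD "focus_areas" []) []
  let focus_counts := PySem.Dict.counter all_focus_areas
  (focus_counts.items.filter (fun p => 1 < p.2)).map Prod.fst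

-- ===== PORT B =====
-- B's comprehension 'for i, x in enumerate(flat)' as structural recursion on the remaining
-- list with the running index i; flat[:i] / flat[i+1:] are List.take i / List.drop (i+1),
-- exact since enumerate's i is a nonnegative in-range index.
def pvEmit (flat : List String) : Nat → List String → List String
  | _, [] => []
  | i, x :: rest =>
      if !(flat.take i).contains x && (flat.drop (i + 1)).contains x then
        x :: pvEmit flat (i + 1) rest
      else
        pvEmit flat (i + 1) rest

def find_common_ground_py_alt (agent_responses : List (List (String × List String))) : List String :=
  let flat :=
    agent_responses.flatMap (fun response => (PySem.Dict.mk response).getD "focus_areas" [])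
  pvEmit flat 0 flat

-- ===== PRECONDITION & SPEC =====
def Spec_find_common_ground_py (agent_responses : List (List (String × List String))) (out : List String) : Prop := out = find_common_ground_py_alt agent_responses
instance (agent_responses : List (List (String × List String))) (out : List String) : Decidable (Spec_find_common_ground_py agent_responses out) := by unfold Spec_find_common_ground_py; infer_instance

-- ===== CLAIM (what is proved, stated in full; the proofs are below) =====
def Claim_equal_find_common_ground_py : Prop := ∀ (agent_responses : List (List (String × List String))), Dom_find_common_ground_py agent_responses → Spec_find_common_ground_py agent_responses (find_common_ground_py agent_responses)

-- ===== LEMMAS AND PROOFS =====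

-- B's self-scan over the suffix l of flat = pre ++ l emits exactly the first occurrences
-- (in order) of the areas not in pre that occur at least twice in l.
theorem pv_emit_eq (l : List String) :
    ∀ (pre : List String),
      pvEmit (pre ++ l) pre.length l
        = (PySem.Set.ofList l).filter
            (fun y => !pre.contains y && decide (2 ≤ l.count y)) := by
  induction l with
  | nil => intro pre; simp [pvEmit]
  | cons x t ih =>
    intro pre
    have htake : (pre ++ x :: t).take pre.length = pre := List.take_left
    have hdrop : (pre ++ x :: t).drop (pre.length + 1) = t := by
      have h1 : pre ++ x :: t = (pre ++ [x]) ++ t := by simp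
      rw [h1]
      have hlen : pre.length + 1 = (pre ++ [x]).length := by simp
      rw [hlen, List.drop_left]
    have hrec : pvEmit (pre ++ x :: t) (pre.length + 1) t
        = (PySem.Set.ofList t).filter
            (fun y => !(pre ++ [x]).contains y && decide (2 ≤ t.count y)) := by
      have h1 : pre ++ x :: t = (pre ++ [x]) ++ t := by simp
      have h2 : pre.length + 1 = (pre ++ [x]).length := by simp
      rw [h1, h2, ih (pre ++ [x])]
    have hcnt : (decide (2 ≤ (x :: t).count x)) = t.contains x := by
      have h1 : (x :: t).count x = t.count x + 1 := by simp
      rcases Bool.eq_false_or_eq_true (t.contains x) with h | h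
      · have hm : x ∈ t := by simpa using h
        have hpos := List.count_pos_iff.mpr hm
        have h2 : 2 ≤ (x :: t).count x := by omega
        simp [hm]
      · have hm : x ∉ t := by simpa using h
        have hz : t.count x = 0 := List.count_eq_zero.mpr hm
        simp only [h1, hz]
        simpa using hm
    have htail : List.filter (fun y => !pre.contains y && decide (2 ≤ (x :: t).count y))
        ((PySem.Set.ofList t).discard x)
      = List.filter (fun y => !(pre ++ [x]).contains y && decide (2 ≤ t.count y))
          (PySem.Set.ofList t) := by
      show List.filter _ (List.filter _ (PySem.Set.ofList t)) = _
      rw [List.filter_filter]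
      apply List.filter_congr
      intro y _
      by_cases hyx : y = x
      · subst hyx; simp
      · have hc : (x :: t).count y = t.count y := by
          simp [Ne.symm hyx]
        simp [hc, hyx]
    rw [PySem.Set.ofList_cons, List.filter_cons]
    simp only [pvEmit, htake, hdrop, hrec, hcnt, htail]

-- A's filtered Counter items, pushed through map/filter algebra.
theorem pv_A_as_filter (flat : List String) :
    ((PySem.Dict.counter flat).items.filter (fun p => 1 < p.2)).map Prod.fst
      = (PySem.Set.ofList flat).filter
          (fun k => decide ((1 : Int) < (flat.count k : Int))) := by
  rw [PySem.Dict.items_counter]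
  rw [List.filter_map, List.map_map]
  simp [Function.comp_def]

theorem find_common_ground_py_spec : Claim_equal_find_common_ground_py := by
  intro ar _
  unfold Spec_find_common_ground_py find_common_ground_py find_common_ground_py_alt
  rw [PySem.List.foldl_append_eq_flatMap]
  simp only [List.nil_append]
  set flat := ar.flatMap (fun response => (PySem.Dict.mk response).getD "focus_areas" []) with hf
  have hb : pvEmit flat 0 flat = pvEmit ([] ++ flat) (List.length ([] : List String)) flat := rfl
  rw [pv_A_as_filter, hb, pv_emit_eq flat []]
  apply List.filter_congr
  intro x _
  by_cases hc : 2 ≤ flat.count x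
  · have h1 : (1 : Int) < (flat.count x : Int) := by exact_mod_cast hc
    simp [h1, hc]
  · have h1 : ¬ ((1 : Int) < (flat.count x : Int)) := by exact_mod_cast hc
    simp [h1, hc]

-- ===== VERDICT (by name: the statement is the Claim_ definition above) =====
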